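-- pv_equiv track=rewrite | github.com/piweiblen/BloonsPlayer | src/player.py | pos_insert
-- ===== SOURCE A (Python) =====
-- def pos_insert(lis, n):
--     # insert n into sorted list lis, return position inserted
--     min_p = 0
--     max_p = len(lis)
--     ind = (max_p + min_p) // 2
--     while min_p < max_p:
--         if lis[ind] < n:
--             min_p = ind + 1
--         else:
--             max_p = ind
--         ind = (max_p + min_p) // 2
--     lis.insert(ind, n)
--     return ind
-- ===== SOURCE B (Python) =====
-- def pos_insert(lis, n):
--     # insert n into sorted list lis, return position inserted
--     def locate(seg, base):
--         # position for n within the slice seg of lis that starts at absolute index base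
--         if not seg:
--             return base
--         mid = len(seg) // 2
--         if seg[mid] < n:
--             return locate(seg[mid + 1:], base + mid + 1)
--         return locate(seg[:mid], base)
--     ind = locate(lis, 0)
--     lis.insert(ind, n)
--     return ind
-- ===== Notes on version B (the rewrite author's own statement) =====
-- stated objective: alternative
-- what changed: Replaces the imperative two-pointer index loop (mutable min_p/max_p walking indices into lis) with a recursive divide-and-conquer helper that works on list slices carrying a base offset; it probes the same midpoints, so it agrees with A on every input, sorted or not.
import Mathlib
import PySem

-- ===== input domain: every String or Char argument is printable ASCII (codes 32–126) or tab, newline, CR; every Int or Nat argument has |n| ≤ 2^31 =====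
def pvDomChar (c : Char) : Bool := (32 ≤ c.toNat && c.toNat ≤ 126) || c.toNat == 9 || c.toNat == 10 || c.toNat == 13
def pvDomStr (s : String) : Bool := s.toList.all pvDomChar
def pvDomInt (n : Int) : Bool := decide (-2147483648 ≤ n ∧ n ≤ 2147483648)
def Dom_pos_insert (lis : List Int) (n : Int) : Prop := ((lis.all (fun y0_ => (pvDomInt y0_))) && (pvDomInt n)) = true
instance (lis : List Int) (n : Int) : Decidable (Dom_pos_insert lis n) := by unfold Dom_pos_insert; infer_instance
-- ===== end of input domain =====

-- B recasts A's imperative two-pointer index loop as a recursive helper over list slices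
-- (alternative decomposition); both Pythons mutate lis in place (lis.insert) — the
-- equivalence proved here is about the RETURN value only.

-- ===== PORT A =====
-- A's while loop over min_p < max_p; along the loop 0 ≤ ind < lis.length always holds,
-- so plain getD for lis[ind] is exact (Python never raises here), and all quantities are
-- nonneg so Nat / matches Python's //.
def posInsertLoop (lis : List Int) (n : Int) (minP maxP : Nat) : Nat :=
  if _h : minP < maxP then
    let ind := (maxP + minP) / 2
    if lis.getD ind 0 < n then
      posInsertLoop lis n (ind + 1) maxP
    else
      posInsertLoop lis n minP ind
  else
    (maxP + minP) / 2
termination_by maxP - minP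
decreasing_by all_goals omega

def pos_insert (lis : List Int) (n : Int) : Int :=
  (posInsertLoop lis n 0 lis.length : Int)

-- ===== PORT B =====
-- B's recursive locate(seg, base): the nonneg slices seg[mid+1:] and seg[:mid] are exactly
-- drop (mid+1) and take mid; seg[mid] with 0 ≤ mid < len(seg) is exactly getD.
def posInsertLocate (seg : List Int) (n : Int) (base : Nat) : Nat :=
  if h : seg = [] then base
  else
    let mid := seg.length / 2
    if seg.getD mid 0 < n then
      posInsertLocate (seg.drop (mid + 1)) n (base + mid + 1)
    else
      posInsertLocate (seg.take mid) n base
termination_by seg.length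
decreasing_by
  all_goals
    simp only [List.length_drop, List.length_take]
    have : 0 < seg.length := List.length_pos_iff.mpr h
    omega

def pos_insert_alt (lis : List Int) (n : Int) : Int :=
  (posInsertLocate lis n 0 : Nat)

-- ===== PRECONDITION & SPEC =====
def Spec_pos_insert (lis : List Int) (n : Int) (out : Int) : Prop := out = pos_insert_alt lis n
instance (lis : List Int) (n : Int) (out : Int) : Decidable (Spec_pos_insert lis n out) := by unfold Spec_pos_insert; infer_instance

-- ===== CLAIM (what is proved, stated in full; the proofs are below) =====
def Claim_equal_pos_insert : Prop := ∀ (lis : List Int) (n : Int), Dom_pos_insert lis n → Spec_pos_insert lis n (pos_insert lis n)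

-- ===== LEMMAS AND PROOFS =====

-- the loop on window [minP, maxP) equals locate on the corresponding slice with base minP
theorem loop_eq_locate (lis : List Int) (n : Int) (minP maxP : Nat)
    (h1 : minP ≤ maxP) (h2 : maxP ≤ lis.length) :
    posInsertLoop lis n minP maxP
      = posInsertLocate ((lis.drop minP).take (maxP - minP)) n minP := by
  set seg := (lis.drop minP).take (maxP - minP) with hseg
  have hlen : seg.length = maxP - minP := by
    simp [hseg]; omega
  by_cases h : minP < maxP
  · rw [posInsertLoop, dif_pos h, posInsertLocate,
      dif_neg (by simp [← List.length_pos_iff, hlen]; omega)]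
    show (if lis.getD ((maxP + minP) / 2) 0 < n then
            posInsertLoop lis n ((maxP + minP) / 2 + 1) maxP
          else posInsertLoop lis n minP ((maxP + minP) / 2))
        = (if seg.getD (seg.length / 2) 0 < n then
            posInsertLocate (seg.drop (seg.length / 2 + 1)) n (minP + seg.length / 2 + 1)
          else posInsertLocate (seg.take (seg.length / 2)) n minP)
    have hind : (maxP + minP) / 2 < maxP := by omega
    have hindlis : (maxP + minP) / 2 < lis.length := by omega
    have hmlt : seg.length / 2 < seg.length := by omega
    have hget : seg.getD (seg.length / 2) 0 = lis.getD ((maxP + minP) / 2) 0 := by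
      rw [List.getD_eq_getElem seg 0 hmlt, List.getD_eq_getElem lis 0 hindlis]
      rw [List.getElem_take, List.getElem_drop]
      exact getElem_congr rfl
        (show minP + seg.length / 2 = (maxP + minP) / 2 by rw [hlen]; omega)
          (by rw [hlen]; omega)
    rw [hget]
    by_cases hl : lis.getD ((maxP + minP) / 2) 0 < n
    · rw [if_pos hl, if_pos hl, hlen, hseg]
      have e1 : maxP - minP - ((maxP - minP) / 2 + 1) = maxP - ((maxP + minP) / 2 + 1) := by
        omega
      have e2 : minP + ((maxP - minP) / 2 + 1) = (maxP + minP) / 2 + 1 := by omega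
      have e3 : minP + (maxP - minP) / 2 + 1 = (maxP + minP) / 2 + 1 := by omega
      rw [List.drop_take, List.drop_drop, e1, e2, e3]
      exact loop_eq_locate lis n ((maxP + minP) / 2 + 1) maxP (by omega) h2
    · rw [if_neg hl, if_neg hl, hlen, hseg, List.take_take]
      have e4 : min ((maxP - minP) / 2) (maxP - minP) = (maxP + minP) / 2 - minP := by omega
      rw [e4]
      exact loop_eq_locate lis n minP ((maxP + minP) / 2) (by omega) (by omega)
  · rw [posInsertLoop, dif_neg h, posInsertLocate,
      dif_pos (by rw [← List.length_eq_zero_iff, hlen]; omega)]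
    omega
termination_by maxP - minP
decreasing_by all_goals omega

-- ===== VERDICT (by name: the statement is the Claim_ definition above) =====
theorem pos_insert_spec : Claim_equal_pos_insert := by
  intro lis n _
  unfold Spec_pos_insert pos_insert pos_insert_alt
  rw [loop_eq_locate lis n 0 lis.length (Nat.zero_le _) le_rfl]
  simp
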